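-- pv_equiv track=rewrite | github.com/serialmetrics/automation | emails/imap_utils.py | get_text_without_breaking_words
-- ===== SOURCE A (Python) =====
-- def get_text_without_breaking_words(text, max_length):
--     if len(text) <= max_length:
--         return text
--
--     words = text.split()
--     result = ""
--     for word in words:
--         if not word.strip():
--             continue
--         if len(result) + len(word) + 1 > max_length:
--             break
--         result += (word + " ")
--
--     return result.strip()
-- ===== SOURCE B (Python) =====
-- def get_text_without_breaking_words(text, max_length):
--     if len(text) <= max_length:
--         return text
--     words = text.split()
--     # prefix-sum table: cums[i] = total length of words[:i+1] joined, each word costing len+1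
--     cums = []
--     total = 0
--     for w in words:
--         total += len(w) + 1
--         cums.append(total)
--     # binary search for the longest prefix whose budget fits max_length
--     lo, hi = 0, len(words)
--     while lo < hi:
--         mid = (lo + hi) // 2
--         if cums[mid] <= max_length:
--             lo = mid + 1
--         else:
--             hi = mid
--     return " ".join(words[:lo])
-- ===== Notes on version B (the rewrite author's own statement) =====
-- stated objective: alternative
-- what changed: A's single accumulate-words-until-the-budget-breaks loop is replaced by building a prefix-sum table of cumulative joined lengths and binary-searching it for the longest fitting prefix, which is then joined with ' '.join instead of concatenation plus strip.
import Mathlib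
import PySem

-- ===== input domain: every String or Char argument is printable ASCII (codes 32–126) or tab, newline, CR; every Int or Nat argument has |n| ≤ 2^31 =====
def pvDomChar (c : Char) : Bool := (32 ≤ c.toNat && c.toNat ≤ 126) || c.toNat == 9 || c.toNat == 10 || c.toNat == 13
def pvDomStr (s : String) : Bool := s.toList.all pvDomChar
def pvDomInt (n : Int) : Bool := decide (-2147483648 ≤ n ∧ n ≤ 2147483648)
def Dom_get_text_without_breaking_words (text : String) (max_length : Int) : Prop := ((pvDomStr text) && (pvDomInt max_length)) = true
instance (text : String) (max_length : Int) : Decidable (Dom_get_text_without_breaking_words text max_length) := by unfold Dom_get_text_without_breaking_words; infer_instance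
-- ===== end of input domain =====

-- B replaces A's accumulate-and-break loop by a prefix-sum table plus binary search over it; objective: alternative (same result, different algorithm).

-- ===== PORT A =====
-- A's for-loop with continue/break, as structural recursion over the word list.
def pvLoopA (m : Int) : List (List Char) → List Char → List Char
  | [], result => result
  | w :: ws, result =>
    if PySem.Chars.strip w = [] then pvLoopA m ws result
    else if (result.length : Int) + (w.length : Int) + 1 > m then result
    else pvLoopA m ws (result ++ (w ++ [' ']))

def get_text_without_breaking_words (text : String) (max_length : Int) : String :=
  if PySem.Str.len text ≤ max_length then text
  else String.ofList (PySem.Chars.strip (pvLoopA max_length (PySem.Chars.split₀ text.toList) []))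

-- ===== PORT B =====
-- cums: running-total prefix sums of len(w)+1, as in Source B's for-loop.
def pvCums : List (List Char) → Int → List Int
  | [], _ => []
  | w :: ws, total => (total + (w.length : Int) + 1) :: pvCums ws (total + (w.length : Int) + 1)

-- Source B's while-loop binary search; terminates because hi - lo shrinks.
def pvBS (cums : List Int) (m : Int) (lo hi : Int) : Int :=
  if h : lo < hi then
    let mid := PySem.Int.floordiv (lo + hi) 2
    if PySem.List.pyGetD cums mid 0 ≤ m then pvBS cums m (mid + 1) hi
    else pvBS cums m lo mid
  else lo
termination_by (hi - lo).toNat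
decreasing_by
  · have := (PySem.Int.floordiv_two_mid_bounds (le_of_lt h)).1
    omega
  · have h2 : PySem.Int.floordiv (lo + hi) 2 < hi := by
      rw [PySem.Int.floordiv_lt_iff_lt_mul (by norm_num)]
      omega
    omega

def get_text_without_breaking_words_alt (text : String) (max_length : Int) : String :=
  if PySem.Str.len text ≤ max_length then text
  else
    let words := PySem.Chars.split₀ text.toList
    let k := pvBS (pvCums words 0) max_length 0 (words.length : Int)
    -- words[:k] with 0 ≤ k ≤ len(words) is List.take; " ".join is Chars.join
    String.ofList (PySem.Chars.join [' '] (words.take k.toNat))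

-- ===== PRECONDITION & SPEC =====
def Spec_get_text_without_breaking_words (text : String) (max_length : Int) (out : String) : Prop := out = get_text_without_breaking_words_alt text max_length
instance (text : String) (max_length : Int) (out : String) : Decidable (Spec_get_text_without_breaking_words text max_length out) := by unfold Spec_get_text_without_breaking_words; infer_instance

-- ===== CLAIM (what is proved, stated in full; the proofs are below) =====
def Claim_equal_get_text_without_breaking_words : Prop := ∀ (text : String) (max_length : Int), Dom_get_text_without_breaking_words text max_length → Spec_get_text_without_breaking_words text max_length (get_text_without_breaking_words text max_length)

-- ===== LEMMAS AND PROOFS =====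

-- a word produced by split(): nonempty, no whitespace characters
def pvGood (w : List Char) : Prop := w ≠ [] ∧ ∀ c ∈ w, PySem.Chars.isspace c = false

-- the prefix of words that A's loop keeps, tracking the remaining budget b
def pvTakeFit : List (List Char) → Int → List (List Char)
  | [], _ => []
  | w :: ws, b => if (w.length : Int) + 1 > b then [] else w :: pvTakeFit ws (b - (w.length : Int) - 1)

-- each kept word followed by one space, concatenated (the value of A's `result` variable)
def pvFlatTS (l : List (List Char)) : List Char := (l.map (· ++ [' '])).flatten

lemma pvDropWhile_no {w : List Char} (h : ∀ c ∈ w, PySem.Chars.isspace c = false) :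
    List.dropWhile PySem.Chars.isspace w = w := by
  cases w with
  | nil => rfl
  | cons c cs => simp [h c (List.mem_cons_self)]

lemma pvGo_good (s : List Char) : ∀ (cur : List Char) (acc : List (List Char)),
    (∀ c ∈ cur, PySem.Chars.isspace c = false) → (∀ w ∈ acc, pvGood w) →
    ∀ w ∈ PySem.Chars.split₀.go s cur acc, pvGood w := by
  induction s with
  | nil =>
    intro cur acc hcur hacc w hw
    by_cases hc : cur.isEmpty
    · simp [PySem.Chars.split₀.go, hc] at hw
      exact hacc w hw
    · simp [PySem.Chars.split₀.go, hc] at hw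
      rcases hw with hw | hw
      · exact hacc w hw
      · subst hw
        refine ⟨by simpa using hc, ?_⟩
        intro c hc'
        exact hcur c (List.mem_reverse.mp hc')
  | cons c rest ih =>
    intro cur acc hcur hacc w hw
    by_cases hs : PySem.Chars.isspace c
    · by_cases hc : cur.isEmpty
      · simp only [PySem.Chars.split₀.go, hs, hc, if_true] at hw
        exact ih [] acc (by simp) hacc w hw
      · simp only [PySem.Chars.split₀.go, hs, hc, if_true] at hw
        refine ih [] (cur.reverse :: acc) (by simp) ?_ w hw
        intro v hv
        rcases List.mem_cons.mp hv with hv | hv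
        · subst hv
          refine ⟨by simpa using hc, ?_⟩
          intro d hd
          exact hcur d (List.mem_reverse.mp hd)
        · exact hacc v hv
    · simp only [PySem.Chars.split₀.go, hs] at hw
      refine ih (c :: cur) acc ?_ hacc w hw
      intro d hd
      rcases List.mem_cons.mp hd with hd | hd
      · subst hd
        simpa using hs
      · exact hcur d hd

lemma pvSplitGood (s : List Char) : ∀ w ∈ PySem.Chars.split₀ s, pvGood w := by
  rw [PySem.Chars.split₀.eq_def]
  exact pvGo_good s [] [] (by simp) (by simp)

lemma pvStripGood {w : List Char} (h : pvGood w) : PySem.Chars.strip w = w := by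
  unfold PySem.Chars.strip PySem.Chars.lstrip PySem.Chars.rstrip
  rw [pvDropWhile_no h.2]
  rw [pvDropWhile_no (fun c hc => h.2 c (List.mem_reverse.mp hc))]
  simp

lemma pvLoopA_eq (m : Int) (ws : List (List Char)) (acc : List Char)
    (hg : ∀ w ∈ ws, pvGood w) :
    pvLoopA m ws acc = acc ++ pvFlatTS (pvTakeFit ws (m - acc.length)) := by
  induction ws generalizing acc with
  | nil => simp [pvLoopA, pvTakeFit, pvFlatTS]
  | cons w ws ih =>
    have hgw := hg w (List.mem_cons_self)
    have hne : PySem.Chars.strip w ≠ [] := by rw [pvStripGood hgw]; exact hgw.1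
    by_cases hb : (acc.length : Int) + (w.length : Int) + 1 > m
    · have hb' : (w.length : Int) + 1 > m - acc.length := by omega
      simp [pvLoopA, hne, hb, pvTakeFit, hb', pvFlatTS]
    · have hb' : ¬ ((w.length : Int) + 1 > m - acc.length) := by omega
      simp only [pvLoopA, hne, hb, if_false, pvTakeFit, hb']
      rw [ih (acc ++ (w ++ [' '])) (fun v hv => hg v (List.mem_cons_of_mem _ hv))]
      simp only [pvFlatTS, List.map_cons, List.flatten_cons, List.length_append,
        List.length_cons, List.length_nil]
      rw [List.append_assoc]
      congr 3
      push_cast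
      ring_nf

lemma pvTakeFit_prefix (ws : List (List Char)) (b : Int) :
    pvTakeFit ws b = ws.take (pvTakeFit ws b).length := by
  induction ws generalizing b with
  | nil => simp [pvTakeFit]
  | cons w ws ih =>
    by_cases hb : (w.length : Int) + 1 > b
    · simp [pvTakeFit, hb]
    · simp only [pvTakeFit, hb, ite_false, List.length_cons, List.take_succ_cons]
      exact congrArg _ (ih _)

lemma pvTakeFit_mem {w : List Char} (ws : List (List Char)) (b : Int)
    (h : w ∈ pvTakeFit ws b) : w ∈ ws := by
  rw [pvTakeFit_prefix ws b] at h
  exact List.mem_of_mem_take h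

lemma pvTakeFit_len_le (ws : List (List Char)) (b : Int) :
    (pvTakeFit ws b).length ≤ ws.length := by
  conv_lhs => rw [pvTakeFit_prefix]
  simp

lemma pvCums_spec (ws : List (List Char)) (t : Int) (m : Int) : ∀ (i : Nat), i < ws.length →
    ((pvCums ws t).getD i 0 ≤ m ↔ i < (pvTakeFit ws (m - t)).length) := by
  induction ws generalizing t with
  | nil => intro i hi; simp at hi
  | cons w ws ih =>
    intro i hi
    by_cases hb : (w.length : Int) + 1 > m - t
    · -- break at the first word: no word fits
      have hk : pvTakeFit (w :: ws) (m - t) = [] := by simp [pvTakeFit, hb]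
      rw [hk]
      cases i with
      | zero => simp [pvCums]; omega
      | succ j =>
        simp only [pvCums, List.getD_cons_succ, List.length_nil]
        have hj : j < ws.length := by simpa using hi
        rw [ih (t + (w.length : Int) + 1) j hj]
        constructor
        · intro hle
          exfalso
          -- budget is negative, so no word of ws fits either
          cases ws with
          | nil => simp at hj
          | cons w' ws' =>
            have : (w'.length : Int) + 1 > m - (t + (w.length : Int) + 1) := by
              have : (0:Int) ≤ w'.length := Int.natCast_nonneg _
              omega
            simp [pvTakeFit, this] at hle
        · omega
    · have hk : pvTakeFit (w :: ws) (m - t) =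
          w :: pvTakeFit ws (m - t - (w.length : Int) - 1) := by simp [pvTakeFit, hb]
      rw [hk]
      cases i with
      | zero => simp [pvCums]; omega
      | succ j =>
        simp only [pvCums, List.getD_cons_succ, List.length_cons, Nat.succ_lt_succ_iff]
        have hj : j < ws.length := by simpa using hi
        rw [ih (t + (w.length : Int) + 1) j hj,
          show m - t - (w.length : Int) - 1 = m - (t + (w.length : Int) + 1) from by ring]

lemma pvBS_eq_aux (ws : List (List Char)) (m : Int) : ∀ (d : Nat) (lo hi : Int),
    (hi - lo).toNat ≤ d →
    lo ≤ ((pvTakeFit ws m).length : Int) → ((pvTakeFit ws m).length : Int) ≤ hi →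
    hi ≤ (ws.length : Int) → 0 ≤ lo →
    pvBS (pvCums ws 0) m lo hi = ((pvTakeFit ws m).length : Int) := by
  intro d
  induction d with
  | zero =>
    intro lo hi hd h1 h2 h3 h0
    rw [pvBS]
    have : ¬ lo < hi := by omega
    simp only [this, dite_false]
    omega
  | succ d ih =>
    intro lo hi hd h1 h2 h3 h0
    rw [pvBS]
    by_cases hlt : lo < hi
    · simp only [hlt, dite_true]
      set mid := PySem.Int.floordiv (lo + hi) 2 with hmid
      have hmlo : lo ≤ mid := (PySem.Int.floordiv_two_mid_bounds (le_of_lt hlt)).1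
      have hmhi : mid < hi := by
        rw [hmid, PySem.Int.floordiv_lt_iff_lt_mul (by norm_num)]; omega
      have hmn : mid.toNat < ws.length := by omega
      have hcast : mid = ((mid.toNat : Nat) : Int) := by omega
      have hget : PySem.List.pyGetD (pvCums ws 0) mid 0 = (pvCums ws 0).getD mid.toNat 0 := by
        conv_lhs => rw [hcast]
        rw [PySem.List.pyGetD_natCast]
      have hspec := pvCums_spec ws 0 m mid.toNat hmn
      rw [sub_zero] at hspec
      by_cases hle : PySem.List.pyGetD (pvCums ws 0) mid 0 ≤ m
      · simp only [hle, if_true]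
        have hlt' : mid.toNat < (pvTakeFit ws m).length := hspec.mp (by rwa [hget] at hle)
        exact ih (mid + 1) hi (by omega) (by omega) h2 h3 (by omega)
      · simp only [hle, if_false]
        have hge : ¬ mid.toNat < (pvTakeFit ws m).length := fun hc => hle (by rw [hget]; exact hspec.mpr hc)
        exact ih lo mid (by omega) h1 (by omega) (by omega) h0
    · simp only [hlt, dite_false]
      omega

lemma pvJoin_ne_nil {w : List Char} {l : List (List Char)} (hw : w ≠ []) :
    PySem.Chars.join [' '] (w :: l) ≠ [] := by
  cases l with
  | nil => simpa [PySem.Chars.join_singleton] using hw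
  | cons v l => simp [PySem.Chars.join_cons_cons]

lemma pvRstrip_flatTS (l : List (List Char)) (hg : ∀ w ∈ l, pvGood w) (hne : l ≠ []) :
    PySem.Chars.rstrip (pvFlatTS l) = PySem.Chars.join [' '] l := by
  induction l with
  | nil => exact absurd rfl hne
  | cons w l ih =>
    have hgw := hg w (List.mem_cons_self)
    cases l with
    | nil =>
      unfold PySem.Chars.rstrip
      simp only [pvFlatTS, List.map_cons, List.map_nil, List.flatten_cons, List.flatten_nil,
        List.append_nil, PySem.Chars.join_singleton]
      rw [List.reverse_append]
      simp only [List.reverse_cons, List.reverse_nil, List.nil_append, List.singleton_append,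
        List.dropWhile_cons]
      have : PySem.Chars.isspace ' ' = true := by decide
      rw [if_pos this, pvDropWhile_no (fun c hc => hgw.2 c (List.mem_reverse.mp hc))]
      simp
    | cons v l' =>
      have hrec := ih (fun u hu => hg u (List.mem_cons_of_mem _ hu)) (by simp)
      have hjne : PySem.Chars.join [' '] (v :: l') ≠ [] :=
        pvJoin_ne_nil (hg v (by simp)).1
      have hflat : pvFlatTS (w :: v :: l') = (w ++ [' ']) ++ pvFlatTS (v :: l') := by
        simp [pvFlatTS]
      rw [hflat]
      unfold PySem.Chars.rstrip at hrec ⊢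
      rw [List.reverse_append, List.dropWhile_append]
      have hdw : (List.dropWhile PySem.Chars.isspace (pvFlatTS (v :: l')).reverse).isEmpty = false := by
        by_contra hcon
        have : List.dropWhile PySem.Chars.isspace (pvFlatTS (v :: l')).reverse = [] := by
          simpa [List.isEmpty_iff] using hcon
        rw [this] at hrec
        exact hjne (by simpa using hrec.symm)
      rw [hdw]
      simp only [if_false, Bool.false_eq_true, List.reverse_append]
      rw [List.reverse_reverse]
      -- reverse (dropWhile …) = join of the tail, by hrec
      rw [show (List.dropWhile PySem.Chars.isspace (pvFlatTS (v :: l')).reverse).reverse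
            = PySem.Chars.join [' '] (v :: l') from hrec]
      rw [PySem.Chars.join_cons_cons]
      simp

lemma pvStrip_flatTS (l : List (List Char)) (hg : ∀ w ∈ l, pvGood w) :
    PySem.Chars.strip (pvFlatTS l) = PySem.Chars.join [' '] l := by
  cases l with
  | nil => simp [pvFlatTS, PySem.Chars.strip, PySem.Chars.lstrip, PySem.Chars.rstrip,
      PySem.Chars.join_nil]
  | cons w l =>
    have hgw := hg w (List.mem_cons_self)
    unfold PySem.Chars.strip
    have hflat : pvFlatTS (w :: l) = w ++ ([' '] ++ pvFlatTS l) := by simp [pvFlatTS]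
    have hl : PySem.Chars.lstrip (pvFlatTS (w :: l)) = pvFlatTS (w :: l) := by
      unfold PySem.Chars.lstrip
      rw [hflat]
      obtain ⟨hne, hns⟩ := hgw
      cases w with
      | nil => exact absurd rfl hne
      | cons c cs =>
        simp only [List.cons_append, List.dropWhile_cons, hns c (List.mem_cons_self)]
        simp
    rw [hl]
    exact pvRstrip_flatTS (w :: l) hg (by simp)

-- ===== VERDICT (by name: the statement is the Claim_ definition above) =====
theorem get_text_without_breaking_words_spec : Claim_equal_get_text_without_breaking_words := by
  intro text m _
  unfold Spec_get_text_without_breaking_words get_text_without_breaking_words get_text_without_breaking_words_alt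
  by_cases hg : PySem.Str.len text ≤ m
  · rw [if_pos hg, if_pos hg]
  · rw [if_neg hg, if_neg hg]
    have hgood := pvSplitGood text.toList
    rw [pvLoopA_eq m _ [] hgood]
    show _ = String.ofList (PySem.Chars.join [' ']
      (List.take (pvBS (pvCums (PySem.Chars.split₀ text.toList) 0) m 0
        ((PySem.Chars.split₀ text.toList).length : Int)).toNat (PySem.Chars.split₀ text.toList)))
    rw [pvBS_eq_aux (PySem.Chars.split₀ text.toList) m (((PySem.Chars.split₀ text.toList).length : Int) - 0).toNat 0
        ((PySem.Chars.split₀ text.toList).length : Int) (by omega)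
        (by exact_mod_cast Nat.zero_le _) (by exact_mod_cast pvTakeFit_len_le _ m)
        le_rfl le_rfl]
    rw [Int.toNat_natCast, ← pvTakeFit_prefix]
    simp only [List.nil_append, List.length_nil, Nat.cast_zero, sub_zero]
    rw [pvStrip_flatTS _ (fun w hw => hgood w (pvTakeFit_mem _ _ hw))]
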